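-- pv_equiv track=rewrite | github.com/hithamalbasheir/LeetCode | 1605-minimum-number-of-days-to-make-m-bouquets/1605-minimum-number-of-days-to-make-m-bouquets.py | get_num_of_bouquets
-- ===== SOURCE A (Python) =====
-- from typing import List
--
-- def get_num_of_bouquets(bloomDay: List[int], m: int, k: int) -> int:
--     res = 0
--     boq_num = 0
--     for day in bloomDay:
--         if day <= m:
--             res += 1
--         else:
--             res = 0
--
--         if res == k:
--             boq_num += 1
--             res = 0
--     return boq_num
-- ===== SOURCE B (Python) =====
-- from typing import List
--
--
-- def get_num_of_bouquets(bloomDay: List[int], m: int, k: int) -> int: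
--     # Divide and conquer: each segment is summarised as
--     # (count of bouquets from runs strictly inside the segment,
--     #  blooming-prefix length, blooming-suffix length, all-blooming flag);
--     # summaries of the two halves merge in O(1), joining the boundary runs.
--     n = len(bloomDay)
--     if n == 0:
--         return 0
--
--     def summary(lo, hi):
--         if hi - lo == 1:
--             ok = bloomDay[lo] <= m
--             return (0, 1 if ok else 0, 1 if ok else 0, ok)
--         mid = (lo + hi) // 2
--         cl, pl, sl, al = summary(lo, mid)
--         cr, pr, sr, ar = summary(mid, hi)
--         if al and ar:
--             return (0, pl + pr, pl + pr, True)
--         if al: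
--             return (cr, pl + pr, sr, False)
--         if ar:
--             return (cl, pl, sl + sr, False)
--         return (cl + cr + (sl + pr) // k, pl, sr, False)
--
--     c, p, s, a = summary(0, n)
--     return p // k if a else c + p // k + s // k
-- ===== Notes on version B (the rewrite author's own statement) =====
-- stated objective: alternative
-- what changed: B computes the answer by divide and conquer: each half-segment is summarised as (inner bouquet count, blooming prefix length, blooming suffix length, all-blooming flag) and summaries are merged in O(1) joining the boundary runs with floor division, instead of A's single streak counter reset on non-blooming days and on every k-th hit.
-- outside the precondition, e.g. on get_num_of_bouquets([0], 0, 0): A returns 0, B raises ZeroDivisionError; on get_num_of_bouquets([1], 0, 0): A returns 1, B raises ZeroDivisionError; on get_num_of_bouquets([1, 2], 5, -1): A returns 0, B returns -2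
import Mathlib
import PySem

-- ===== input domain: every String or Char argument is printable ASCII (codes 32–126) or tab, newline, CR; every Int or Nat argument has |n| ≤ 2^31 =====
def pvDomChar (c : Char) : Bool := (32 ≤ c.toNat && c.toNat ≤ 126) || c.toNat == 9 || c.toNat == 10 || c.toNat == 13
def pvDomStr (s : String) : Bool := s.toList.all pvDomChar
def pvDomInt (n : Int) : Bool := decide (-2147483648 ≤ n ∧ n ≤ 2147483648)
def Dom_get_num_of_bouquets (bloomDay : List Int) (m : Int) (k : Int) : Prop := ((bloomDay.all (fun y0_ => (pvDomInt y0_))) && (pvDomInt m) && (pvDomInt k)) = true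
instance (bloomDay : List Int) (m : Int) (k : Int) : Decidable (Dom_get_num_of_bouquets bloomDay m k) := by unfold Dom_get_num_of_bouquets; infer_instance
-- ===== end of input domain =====

-- B replaces A's reset-on-k streak counter with a divide-and-conquer segment summary merged in O(1) per node (alternative algorithm, same linear cost).

-- ===== PORT A =====
def get_num_of_bouquets (bloomDay : List Int) (m : Int) (k : Int) : Int :=
  (bloomDay.foldl
    (fun (s : Int × Int) day =>
      let res := if day ≤ m then s.1 + 1 else 0
      if res = k then (0, s.2 + 1) else (res, s.2))
    (0, 0)).2

-- ===== PORT B =====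
-- merge of two segment summaries (inner bouquet count, blooming prefix, blooming suffix, all-blooming)
def dcMerge (k : Int) (L R : Int × Int × Int × Bool) : Int × Int × Int × Bool :=
  match L, R with
  | (cl, pl, sl, al), (cr, pr, sr, ar) =>
    if al && ar then (0, pl + pr, pl + pr, true)
    else if al then (cr, pl + pr, sr, false)
    else if ar then (cl, pl, sl + sr, false)
    else (cl + cr + PySem.Int.floordiv (sl + pr) k, pl, sr, false)

-- summary(lo, hi) of Source B on the corresponding sublist; recursion splits at the midpoint
def dcSummary (m k : Int) (l : List Int) : Int × Int × Int × Bool :=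
  if h : l.length ≤ 1 then
    match l with
    | [] => (0, 0, 0, true)  -- not reached by get_num_of_bouquets_alt (it only summarises nonempty segments)
    | d :: _ => if d ≤ m then (0, 1, 1, true) else (0, 0, 0, false)
  else
    dcMerge k (dcSummary m k (l.take (l.length / 2))) (dcSummary m k (l.drop (l.length / 2)))
termination_by l.length
decreasing_by
  · simp only [List.length_take]; omega
  · simp only [List.length_drop]; omega

def get_num_of_bouquets_alt (bloomDay : List Int) (m : Int) (k : Int) : Int :=
  if bloomDay.length = 0 then 0
  else
    match dcSummary m k bloomDay with
    | (c, p, s, a) =>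
      if a then PySem.Int.floordiv p k
      else c + PySem.Int.floordiv p k + PySem.Int.floordiv s k

-- ===== PRECONDITION & SPEC =====
-- Pre_ restricts to the problem's natural domain k ≥ 1 (LeetCode guarantees it): for k = 0
-- B's floor division raises ZeroDivisionError while A's reset counter happens to count
-- non-blooming days, and for k < 0 A's counter can never equal k so A returns 0.
def Pre_get_num_of_bouquets (bloomDay : List Int) (m : Int) (k : Int) : Prop := 1 ≤ k
instance (bloomDay : List Int) (m : Int) (k : Int) : Decidable (Pre_get_num_of_bouquets bloomDay m k) := by unfold Pre_get_num_of_bouquets; infer_instance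
def pvWitness_get_num_of_bouquets : List Int × Int × Int := ([1, 10, 3, 10, 2], 3, 1)

def Spec_get_num_of_bouquets (bloomDay : List Int) (m : Int) (k : Int) (out : Int) : Prop := out = get_num_of_bouquets_alt bloomDay m k
instance (bloomDay : List Int) (m : Int) (k : Int) (out : Int) : Decidable (Spec_get_num_of_bouquets bloomDay m k out) := by unfold Spec_get_num_of_bouquets; infer_instance

-- ===== CLAIM (what is proved, stated in full; the proofs are below) =====
def Claim_equal_get_num_of_bouquets : Prop := ∀ (bloomDay : List Int) (m : Int) (k : Int), Dom_get_num_of_bouquets bloomDay m k → Pre_get_num_of_bouquets bloomDay m k → Spec_get_num_of_bouquets bloomDay m k (get_num_of_bouquets bloomDay m k)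

-- ===== LEMMAS AND PROOFS =====

-- A's loop as structural recursion on the list with running counter r.
def specCount (m k : Int) : List Int → Int → Int
  | [], _ => 0
  | d :: ds, r =>
    if d ≤ m then
      (if r + 1 = k then 1 + specCount m k ds 0 else specCount m k ds (r + 1))
    else specCount m k ds 0

def stepA (m k : Int) (s : Int × Int) (day : Int) : Int × Int :=
  let res := if day ≤ m then s.1 + 1 else 0
  if res = k then (0, s.2 + 1) else (res, s.2)

-- maximal runs of equal key (d ≤ m), front to back, as (key, length)
def pyGroupRuns (m : Int) : List Int → List (Bool × Nat)
  | [] => []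
  | d :: ds =>
    match pyGroupRuns m ds with
    | (b, n) :: rest =>
        if decide (d ≤ m) = b then (b, n + 1) :: rest
        else (decide (d ≤ m), 1) :: (b, n) :: rest
    | [] => [(decide (d ≤ m), 1)]

def runsSum (k : Int) : List (Bool × Nat) → Int
  | [] => 0
  | (b, n) :: rest => (if b then PySem.Int.floordiv (Int.ofNat n) k else 0) + runsSum k rest

-- the common specification value: one ⌊L/k⌋ per blooming run
def tVal (m k : Int) (l : List Int) : Int := runsSum k (pyGroupRuns m l)

def allB (m : Int) (l : List Int) : Bool := l.all (fun d => decide (d ≤ m))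
def prefLen (m : Int) (l : List Int) : Int := Int.ofNat (l.takeWhile (fun d => decide (d ≤ m))).length
def sufLen (m : Int) (l : List Int) : Int := prefLen m l.reverse
def fd (x k : Int) : Int := PySem.Int.floordiv x k

theorem fd_zero (k : Int) (hk : 1 ≤ k) : fd 0 k = 0 := by
  unfold fd
  rw [PySem.Int.floordiv_eq_ediv_of_pos (by omega)]
  simp

theorem fd_add_self (k x : Int) (hk : 1 ≤ k) (hx : 0 ≤ x) :
    fd (k + x) k = 1 + fd x k := by
  unfold fd
  rw [PySem.Int.floordiv_eq_ediv_of_pos (by omega),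
      PySem.Int.floordiv_eq_ediv_of_pos (by omega)]
  rw [show k + x = x + 1 * k by ring, Int.add_mul_ediv_right _ _ (by omega : k ≠ 0)]
  omega

theorem fd_small (k x : Int) (hk : 1 ≤ k) (h0 : 0 ≤ x) (hx : x < k) :
    fd x k = 0 := by
  unfold fd
  rw [PySem.Int.floordiv_eq_ediv_of_pos (by omega)]
  exact Int.ediv_eq_zero_of_lt h0 hx

-- ===== A-side: the fold equals specCount, and specCount equals tVal =====

theorem foldl_snd_add (m k : Int) (hk : 1 ≤ k) (l : List Int) :
    ∀ r b : Int,
      (l.foldl (stepA m k) (r, b)).2 = b + specCount m k l r := by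
  induction l with
  | nil => intro r b; simp [specCount]
  | cons d ds ih =>
      intro r b
      rw [List.foldl_cons]
      by_cases hd : d ≤ m
      · by_cases hkk : r + 1 = k
        · rw [show stepA m k (r, b) d = (0, b + 1) by simp [stepA, hd, hkk]]
          rw [ih]; simp [specCount, hd, hkk]; omega
        · rw [show stepA m k (r, b) d = (r + 1, b) by simp [stepA, hd, hkk]]
          rw [ih]; simp [specCount, hd, hkk]
      · rw [show stepA m k (r, b) d = (0, b) by simp [stepA, hd]; omega]
        rw [ih]; simp [specCount, hd]

-- specCount when the pending counter r is folded into the first (blooming) run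
def bVal (m k : Int) (l : List Int) (r : Int) : Int :=
  match pyGroupRuns m l with
  | (true, n) :: rest => PySem.Int.floordiv (r + Int.ofNat n) k + runsSum k rest
  | gs => runsSum k gs

theorem specCount_eq_bVal (m k : Int) (hk : 1 ≤ k) (l : List Int) :
    ∀ r : Int, 0 ≤ r → r < k → specCount m k l r = bVal m k l r := by
  induction l with
  | nil => intro r _ _; simp [specCount, bVal, pyGroupRuns, runsSum]
  | cons d ds ih =>
      intro r hr0 hrk
      by_cases hd : d ≤ m
      · by_cases hk1 : r + 1 = k
        · have e : specCount m k (d :: ds) r = 1 + specCount m k ds 0 := by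
            simp [specCount, hd, hk1]
          rw [e, ih 0 le_rfl (by omega)]
          cases hgs : pyGroupRuns m ds with
          | nil =>
              have hg : pyGroupRuns m (d :: ds) = [(true, 1)] := by
                simp [pyGroupRuns, hgs, hd]
              simp only [bVal, hg, hgs, runsSum]
              have h1 := fd_add_self k 0 hk le_rfl
              have h0 := fd_zero k hk
              unfold fd at h1 h0
              rw [show r + Int.ofNat 1 = k + 0 by simp [Int.ofNat]; omega, h1, h0]
              omega
          | cons g rest =>
              obtain ⟨b, n⟩ := g
              cases b
              · have hg : pyGroupRuns m (d :: ds) = (true, 1) :: (false, n) :: rest := by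
                  simp [pyGroupRuns, hgs, hd]
                simp only [bVal, hg, hgs, runsSum]
                have h1 := fd_add_self k 0 hk le_rfl
                have h0 := fd_zero k hk
                unfold fd at h1 h0
                rw [show r + Int.ofNat 1 = k + 0 by simp [Int.ofNat]; omega, h1, h0]
                simp
              · have hg : pyGroupRuns m (d :: ds) = (true, n + 1) :: rest := by
                  simp [pyGroupRuns, hgs, hd]
                simp only [bVal, hg, hgs]
                have h1 := fd_add_self k (Int.ofNat n) hk (Int.ofNat_nonneg n)
                unfold fd at h1
                rw [show r + Int.ofNat (n + 1) = k + Int.ofNat n by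
                      simp [Int.ofNat]; push_cast; omega,
                    h1, show (0:Int) + Int.ofNat n = Int.ofNat n by ring]
                omega
        · have e : specCount m k (d :: ds) r = specCount m k ds (r + 1) := by
            simp [specCount, hd, hk1]
          rw [e, ih (r + 1) (by omega) (by omega)]
          cases hgs : pyGroupRuns m ds with
          | nil =>
              have hg : pyGroupRuns m (d :: ds) = [(true, 1)] := by
                simp [pyGroupRuns, hgs, hd]
              simp only [bVal, hg, hgs, runsSum]
              have h1 := fd_small k (r + 1) hk (by omega) (by omega)
              unfold fd at h1
              rw [show r + Int.ofNat 1 = r + 1 by simp [Int.ofNat], h1]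
              omega
          | cons g rest =>
              obtain ⟨b, n⟩ := g
              cases b
              · have hg : pyGroupRuns m (d :: ds) = (true, 1) :: (false, n) :: rest := by
                  simp [pyGroupRuns, hgs, hd]
                simp only [bVal, hg, hgs, runsSum]
                have h1 := fd_small k (r + 1) hk (by omega) (by omega)
                unfold fd at h1
                rw [show r + Int.ofNat 1 = r + 1 by simp [Int.ofNat], h1]
                omega
              · have hg : pyGroupRuns m (d :: ds) = (true, n + 1) :: rest := by
                  simp [pyGroupRuns, hgs, hd]
                simp only [bVal, hg, hgs]
                rw [show r + 1 + Int.ofNat n = r + Int.ofNat (n + 1) by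
                      simp [Int.ofNat]; push_cast; ring]
      · have e : specCount m k (d :: ds) r = specCount m k ds 0 := by
          simp [specCount, hd]
        rw [e, ih 0 le_rfl (by omega)]
        cases hgs : pyGroupRuns m ds with
        | nil =>
            have hg : pyGroupRuns m (d :: ds) = [(false, 1)] := by
              simp [pyGroupRuns, hgs, hd]
            simp only [bVal, hg, hgs, runsSum]
            simp
        | cons g rest =>
            obtain ⟨b, n⟩ := g
            cases b
            · have hg : pyGroupRuns m (d :: ds) = (false, n + 1) :: rest := by
                simp [pyGroupRuns, hgs, hd]
              simp only [bVal, hg, hgs, runsSum]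
              simp
            · have hg : pyGroupRuns m (d :: ds) = (false, 1) :: (true, n) :: rest := by
                simp [pyGroupRuns, hgs, hd]
              simp only [bVal, hg, hgs, runsSum]
              rw [show (0:Int) + Int.ofNat n = Int.ofNat n by ring]
              simp

theorem bVal_zero (m k : Int) (l : List Int) : bVal m k l 0 = tVal m k l := by
  unfold bVal tVal
  cases hgs : pyGroupRuns m l with
  | nil => rfl
  | cons g rest =>
      obtain ⟨b, n⟩ := g
      cases b
      · rfl
      · simp [runsSum]

-- ===== structural lemmas about prefLen / sufLen / allB / tVal =====

theorem allB_append (m : Int) (l1 l2 : List Int) :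
    allB m (l1 ++ l2) = (allB m l1 && allB m l2) := by
  simp [allB, List.all_append]

theorem prefLen_cons (m d : Int) (l : List Int) :
    prefLen m (d :: l) = if d ≤ m then 1 + prefLen m l else 0 := by
  by_cases hd : d ≤ m <;> simp [prefLen, List.takeWhile, hd] <;> push_cast <;> ring

theorem prefLen_append (m : Int) (l1 l2 : List Int) :
    prefLen m (l1 ++ l2) = if allB m l1 then Int.ofNat l1.length + prefLen m l2 else prefLen m l1 := by
  induction l1 with
  | nil => simp [allB, prefLen]
  | cons d ds ih =>
      by_cases hd : d ≤ m
      · rw [List.cons_append, prefLen_cons, if_pos hd, ih, prefLen_cons, if_pos hd]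
        have ha : allB m (d :: ds) = allB m ds := by simp [allB, hd]
        rw [ha]
        by_cases h2 : allB m ds <;> simp [h2] <;> push_cast <;> ring
      · have ha : allB m (d :: ds) = false := by simp [allB, hd]
        rw [List.cons_append, prefLen_cons, if_neg hd, ha, prefLen_cons, if_neg hd]
        simp

theorem allB_reverse (m : Int) (l : List Int) : allB m l.reverse = allB m l := by
  simp [allB]

theorem sufLen_append (m : Int) (l1 l2 : List Int) :
    sufLen m (l1 ++ l2) = if allB m l2 then sufLen m l1 + Int.ofNat l2.length else sufLen m l2 := by
  unfold sufLen
  rw [List.reverse_append, prefLen_append, allB_reverse]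
  by_cases h : allB m l2 <;> simp [h] <;> ring

theorem allB_pref (m : Int) (l : List Int) (h : allB m l = true) :
    prefLen m l = Int.ofNat l.length := by
  unfold prefLen
  rw [List.takeWhile_eq_self_iff.mpr]
  intro a ha; exact List.all_eq_true.mp h a ha

theorem allB_suf (m : Int) (l : List Int) (h : allB m l = true) :
    sufLen m l = Int.ofNat l.length := by
  unfold sufLen
  rw [allB_pref m _ (by rw [allB_reverse]; exact h)]
  simp

theorem allB_groupRuns (m : Int) (l : List Int) (hne : l ≠ []) (h : allB m l = true) :
    pyGroupRuns m l = [(true, l.length)] := by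
  induction l with
  | nil => simp at hne
  | cons d ds ih =>
      simp only [allB, List.all_cons, Bool.and_eq_true, decide_eq_true_eq] at h
      obtain ⟨hd, hds⟩ := h
      cases ds with
      | nil => simp [pyGroupRuns, hd]
      | cons e es =>
          rw [show pyGroupRuns m (d :: e :: es)
                = match pyGroupRuns m (e :: es) with
                  | (b, n) :: rest =>
                      if decide (d ≤ m) = b then (b, n + 1) :: rest
                      else (decide (d ≤ m), 1) :: (b, n) :: rest
                  | [] => [(decide (d ≤ m), 1)] from rfl]
          rw [ih (by simp) hds]
          simp [hd]

theorem allB_tVal (m k : Int) (l : List Int) (h : allB m l = true) :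
    tVal m k l = fd (Int.ofNat l.length) k := by
  cases l with
  | nil => simp [tVal, pyGroupRuns, runsSum, fd, PySem.Int.floordiv]
  | cons d ds =>
      unfold tVal
      rw [allB_groupRuns m _ (by simp) h]
      simp [runsSum, fd]

-- head run of pyGroupRuns measures the blooming prefix
theorem prefLen_groupRuns (m : Int) (l : List Int) :
    (match pyGroupRuns m l with
     | (true, n) :: _ => prefLen m l = Int.ofNat n
     | _ => prefLen m l = 0) := by
  induction l with
  | nil => simp [pyGroupRuns, prefLen]
  | cons d ds ih =>
      by_cases hd : d ≤ m
      · cases hgs : pyGroupRuns m ds with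
        | nil =>
            rw [show pyGroupRuns m (d :: ds) = [(true, 1)] by simp [pyGroupRuns, hgs, hd]]
            have hds : ds = [] := by
              cases ds with
              | nil => rfl
              | cons e es =>
                  simp only [pyGroupRuns] at hgs
                  cases h : pyGroupRuns m es <;> simp [h] at hgs <;> split at hgs <;> simp at hgs
            subst hds
            simp [prefLen, List.takeWhile, hd]
        | cons g rest =>
            obtain ⟨b, n⟩ := g
            rw [hgs] at ih
            cases b
            · rw [show pyGroupRuns m (d :: ds) = (true, 1) :: (false, n) :: rest by
                    simp [pyGroupRuns, hgs, hd]]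
              simp only at ih
              simp only [prefLen_cons, if_pos hd, ih]
              simp [Int.ofNat_eq_natCast]
            · rw [show pyGroupRuns m (d :: ds) = (true, n + 1) :: rest by
                    simp [pyGroupRuns, hgs, hd]]
              simp only at ih
              simp only [prefLen_cons, if_pos hd, ih]
              simp only [Int.ofNat_eq_natCast]
              push_cast
              ring
      · cases hgs : pyGroupRuns m ds with
        | nil =>
            rw [show pyGroupRuns m (d :: ds) = [(false, 1)] by simp [pyGroupRuns, hgs, hd]]
            simp [prefLen_cons, hd]
        | cons g rest =>
            obtain ⟨b, n⟩ := g
            cases b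
            · rw [show pyGroupRuns m (d :: ds) = (false, n + 1) :: rest by
                    simp [pyGroupRuns, hgs, hd]]
              simp [prefLen_cons, hd]
            · rw [show pyGroupRuns m (d :: ds) = (false, 1) :: (true, n) :: rest by
                    simp [pyGroupRuns, hgs, hd]]
              simp [prefLen_cons, hd]

-- tVal over cons
theorem tVal_cons (m k : Int) (hk : 1 ≤ k) (d : Int) (l : List Int) :
    tVal m k (d :: l) =
      if d ≤ m then tVal m k l - fd (prefLen m l) k + fd (1 + prefLen m l) k
      else tVal m k l := by
  have hpre := prefLen_groupRuns m l
  by_cases hd : d ≤ m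
  · rw [if_pos hd]
    cases hgs : pyGroupRuns m l with
    | nil =>
        rw [hgs] at hpre; simp at hpre
        rw [show tVal m k (d :: l) = runsSum k [(true, 1)] by
              unfold tVal; simp [pyGroupRuns, hgs, hd]]
        unfold tVal
        rw [hgs]
        have h0 : PySem.Int.floordiv 0 k = 0 := fd_zero k hk
        simp only [runsSum, hpre, h0, fd, if_true]
        norm_num
    | cons g rest =>
        obtain ⟨b, n⟩ := g
        rw [hgs] at hpre
        cases b
        · simp only at hpre
          rw [show tVal m k (d :: l) = runsSum k ((true, 1) :: (false, n) :: rest) by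
                unfold tVal; simp [pyGroupRuns, hgs, hd]]
          unfold tVal
          rw [hgs]
          have h0 : PySem.Int.floordiv 0 k = 0 := fd_zero k hk
          simp only [runsSum, if_true, Bool.false_eq_true, if_false]
          rw [hpre]
          unfold fd
          rw [h0]
          ring
        · simp only at hpre
          rw [show tVal m k (d :: l) = runsSum k ((true, n + 1) :: rest) by
                unfold tVal; simp [pyGroupRuns, hgs, hd]]
          unfold tVal
          rw [hgs]
          simp only [runsSum, if_true]
          rw [hpre, show Int.ofNat (n + 1) = 1 + Int.ofNat n by
                simp only [Int.ofNat_eq_natCast]; push_cast; ring]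
          unfold fd
          ring
  · rw [if_neg hd]
    cases hgs : pyGroupRuns m l with
    | nil =>
        rw [show tVal m k (d :: l) = runsSum k [(false, 1)] by
              unfold tVal; simp [pyGroupRuns, hgs, hd]]
        unfold tVal
        rw [hgs]
        simp [runsSum]
    | cons g rest =>
        obtain ⟨b, n⟩ := g
        cases b
        · rw [show tVal m k (d :: l) = runsSum k ((false, n + 1) :: rest) by
                unfold tVal; simp [pyGroupRuns, hgs, hd]]
          unfold tVal
          rw [hgs]
          simp [runsSum]
        · rw [show tVal m k (d :: l) = runsSum k ((false, 1) :: (true, n) :: rest) by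
                unfold tVal; simp [pyGroupRuns, hgs, hd]]
          unfold tVal
          rw [hgs]
          simp [runsSum]

theorem sufLen_cons (m d : Int) (l : List Int) :
    sufLen m (d :: l) = if allB m l then (if d ≤ m then 1 else 0) + Int.ofNat l.length else sufLen m l := by
  unfold sufLen
  rw [show (d :: l).reverse = l.reverse ++ [d] from by simp,
      prefLen_append, allB_reverse]
  by_cases ha : allB m l
  · rw [if_pos ha, if_pos ha]
    have hp1 : prefLen m [d] = if d ≤ m then 1 else 0 := by
      by_cases hd : d ≤ m <;> simp [prefLen, List.takeWhile, hd]
    rw [hp1]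
    simp only [List.length_reverse]
    ring
  · simp [ha]

-- KEY: tVal over append joins the boundary runs with floor division
theorem tVal_append (m k : Int) (hk : 1 ≤ k) (l1 l2 : List Int) :
    tVal m k (l1 ++ l2) =
      tVal m k l1 + tVal m k l2 - fd (sufLen m l1) k - fd (prefLen m l2) k
        + fd (sufLen m l1 + prefLen m l2) k := by
  induction l1 with
  | nil =>
      simp [tVal, pyGroupRuns, runsSum, sufLen, prefLen, fd_zero k hk]
  | cons d ds ih =>
      rw [List.cons_append, tVal_cons m k hk, tVal_cons m k hk d ds,
          sufLen_cons, prefLen_append, ih]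
      by_cases hd : d ≤ m
      · by_cases ha : allB m ds
        · have hs : sufLen m ds = Int.ofNat ds.length := allB_suf m ds ha
          have hp : prefLen m ds = Int.ofNat ds.length := allB_pref m ds ha
          simp only [hd, if_pos, ha, if_true, hs, hp, ite_true]
          rw [show (1 : Int) + (Int.ofNat ds.length + prefLen m l2)
                = (1 + Int.ofNat ds.length) + prefLen m l2 by ring]
          ring
        · simp only [hd, ha, ite_true, Bool.false_eq_true, ite_false]
          ring
      · by_cases ha : allB m ds
        · have hs : sufLen m ds = Int.ofNat ds.length := allB_suf m ds ha
          simp only [hd, ha, ite_true, ite_false, hs]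
          ring
        · simp only [hd, ha, ite_false, Bool.false_eq_true]
  -- every branch closes by cancellation of the abstracted fd terms

-- ===== the divide-and-conquer invariant =====

theorem dcSummary_correct (m k : Int) (hk : 1 ≤ k) :
    ∀ (n : Nat) (l : List Int), l.length ≤ n → l ≠ [] →
      dcSummary m k l =
        ((if allB m l then 0 else tVal m k l - fd (prefLen m l) k - fd (sufLen m l) k),
         prefLen m l, sufLen m l, allB m l) := by
  intro n
  induction n with
  | zero =>
      intro l hl hne
      cases l with
      | nil => simp at hne
      | cons d ds => simp at hl
  | succ n ih =>
      intro l hl hne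
      by_cases h1 : l.length ≤ 1
      · cases l with
        | nil => simp at hne
        | cons d ds =>
            have hds : ds = [] := by
              cases ds with
              | nil => rfl
              | cons e es => simp at h1
            subst hds
            rw [dcSummary, dif_pos h1]
            by_cases hd : d ≤ m
            · simp [hd, allB, prefLen, sufLen, List.takeWhile]
            · simp [hd, allB, prefLen, sufLen, List.takeWhile, tVal, pyGroupRuns,
                    runsSum, fd_zero k hk]
      · rw [dcSummary, dif_neg h1]
        have hlt : 2 ≤ l.length := by omega
        have hta : (l.take (l.length / 2)).length = l.length / 2 := by simp; omega
        have hne1 : l.take (l.length / 2) ≠ [] := by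
          intro hc; rw [← List.length_eq_zero_iff] at hc; omega
        have hne2 : l.drop (l.length / 2) ≠ [] := by
          intro hc; rw [← List.length_eq_zero_iff] at hc
          simp at hc; omega
        rw [ih (l.take (l.length / 2)) (by simp; omega) hne1,
            ih (l.drop (l.length / 2)) (by simp; omega) hne2]
        have hsplit : l.take (l.length / 2) ++ l.drop (l.length / 2) = l :=
          List.take_append_drop _ l
        have hall : allB m l = (allB m (l.take (l.length / 2)) && allB m (l.drop (l.length / 2))) := by
          conv_lhs => rw [← hsplit]
          exact allB_append m _ _
        have hpre : prefLen m l
            = (if allB m (l.take (l.length / 2))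
                 then Int.ofNat (l.take (l.length / 2)).length + prefLen m (l.drop (l.length / 2))
                 else prefLen m (l.take (l.length / 2))) := by
          conv_lhs => rw [← hsplit]
          exact prefLen_append m _ _
        have hsuf : sufLen m l
            = (if allB m (l.drop (l.length / 2))
                 then sufLen m (l.take (l.length / 2)) + Int.ofNat (l.drop (l.length / 2)).length
                 else sufLen m (l.drop (l.length / 2))) := by
          conv_lhs => rw [← hsplit]
          exact sufLen_append m _ _
        have htv : tVal m k l
            = tVal m k (l.take (l.length / 2)) + tVal m k (l.drop (l.length / 2))
              - fd (sufLen m (l.take (l.length / 2))) k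
              - fd (prefLen m (l.drop (l.length / 2))) k
              + fd (sufLen m (l.take (l.length / 2)) + prefLen m (l.drop (l.length / 2))) k := by
          conv_lhs => rw [← hsplit]
          exact tVal_append m k hk _ _
        by_cases ha1 : allB m (l.take (l.length / 2)) <;>
          by_cases ha2 : allB m (l.drop (l.length / 2))
        · -- both halves all-blooming
          simp only [ha1, ha2, ite_true, dcMerge, Bool.and_self]
          rw [hpre, hsuf, hall]
          simp only [ha1, ha2, ite_true, Bool.and_self]
          rw [allB_pref m _ ha1, allB_suf m _ ha1, allB_pref m _ ha2]
        · -- left all-blooming, right not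
          simp only [ha1, ha2, ite_true, Bool.false_eq_true, ite_false, dcMerge, Bool.and_false]
          rw [hpre, hsuf, hall, htv]
          simp only [ha1, ha2, ite_true, Bool.false_eq_true, ite_false, Bool.and_false]
          rw [allB_pref m _ ha1, allB_suf m _ ha1, allB_tVal m k _ ha1]
          simp only [Prod.mk.injEq, and_true, true_and]
          unfold fd
          ring
        · -- right all-blooming, left not
          simp only [ha1, ha2, Bool.false_eq_true, ite_false, ite_true, dcMerge, Bool.false_and]
          rw [hpre, hsuf, hall, htv]
          simp only [ha1, ha2, ite_true, Bool.false_eq_true, ite_false, Bool.false_and]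
          rw [allB_pref m _ ha2, allB_suf m _ ha2, allB_tVal m k _ ha2]
          simp only [Prod.mk.injEq, and_true, true_and]
          unfold fd
          ring
        · -- neither half all-blooming
          simp only [ha1, ha2, Bool.false_eq_true, ite_false, dcMerge, Bool.false_and]
          rw [hpre, hsuf, hall, htv]
          simp only [ha1, ha2, Bool.false_eq_true, ite_false, Bool.false_and]
          simp only [Prod.mk.injEq, and_true, true_and]
          unfold fd
          ring

-- ===== VERDICT (by name: the statement is the Claim_ definition above) =====
theorem get_num_of_bouquets_spec : Claim_equal_get_num_of_bouquets := by
  intro bloomDay m k _ hk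
  have hk' : (1 : Int) ≤ k := hk
  unfold Spec_get_num_of_bouquets get_num_of_bouquets get_num_of_bouquets_alt
  rw [show (fun (s : Int × Int) day =>
        let res := if day ≤ m then s.1 + 1 else 0
        if res = k then ((0 : Int), s.2 + 1) else (res, s.2)) = stepA m k from rfl]
  rw [foldl_snd_add m k hk', specCount_eq_bVal m k hk' bloomDay 0 le_rfl (by omega), bVal_zero]
  cases bloomDay with
  | nil => simp [tVal, pyGroupRuns, runsSum]
  | cons d ds =>
      rw [if_neg (by simp)]
      rw [dcSummary_correct m k hk' (d :: ds).length (d :: ds) le_rfl (by simp)]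
      by_cases ha : allB m (d :: ds)
      · simp only [ha, ite_true]
        rw [show prefLen m (d :: ds) = Int.ofNat (d :: ds).length from allB_pref m _ ha,
            allB_tVal m k _ ha]
        unfold fd
        ring
      · simp only [ha, Bool.false_eq_true, ite_false]
        have := fd_zero k hk'
        unfold fd
        ring
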